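-- pv_equiv track=rewrite | github.com/tollefj/UD-NARC | alignment/NARC/ann_to_json.py | extract_token_mapping
-- ===== SOURCE A (Python) =====
-- def extract_token_mapping(text):
--     current_word_idx = 0
--     tokens = []
--     sentences = []
--
--     current_token = ""
--
--     current_sentence = []
--     char_to_word_map = {}
--
--     for char_index, char in enumerate(text):
--         char_to_word_map[char_index] = current_word_idx
--         if char == " ":
--             tokens.append(current_token)
--             current_sentence.append(current_token)
--             current_token = ""
--             current_word_idx += 1
--         elif char == "\n":
--             tokens.append(current_token)
--             current_sentence.append(current_token)
--             current_token = ""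
--             current_word_idx += 1
--
--             sentences.append(current_sentence)
--             current_sentence = []
--         else:
--             current_token += char
--     return sentences, tokens, char_to_word_map
-- ===== SOURCE B (Python) =====
-- def extract_token_mapping(text):
--     sentences = [line.split(" ") for line in text.split("\n")[:-1]]
--     tokens = text.replace("\n", " ").split(" ")[:-1]
--     char_to_word_map = {}
--     word_idx = 0
--     for i, ch in enumerate(text):
--         char_to_word_map[i] = word_idx
--         if ch == " " or ch == "\n":
--             word_idx += 1
--     return sentences, tokens, char_to_word_map
-- ===== Notes on version B (the rewrite author's own statement) =====
-- stated objective: simpler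
-- what changed: Replaces A's single six-variable stateful character loop by split-based extraction (split on newline, then on space, dropping the trailing un-terminated segment) plus a separate cumulative-counter pass for the char-to-word map.
import Mathlib
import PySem

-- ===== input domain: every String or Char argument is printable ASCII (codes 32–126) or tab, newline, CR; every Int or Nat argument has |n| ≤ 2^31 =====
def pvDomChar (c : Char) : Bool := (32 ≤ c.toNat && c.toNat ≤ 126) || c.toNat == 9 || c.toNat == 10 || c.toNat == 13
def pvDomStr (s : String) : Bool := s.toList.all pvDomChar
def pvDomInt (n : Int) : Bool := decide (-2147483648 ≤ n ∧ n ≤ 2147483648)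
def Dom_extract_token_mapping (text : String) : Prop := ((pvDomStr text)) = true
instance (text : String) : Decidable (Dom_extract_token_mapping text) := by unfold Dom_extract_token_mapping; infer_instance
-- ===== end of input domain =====

-- B replaces A's single stateful character loop by split-based extraction (split on '\n' /
-- on ' ', dropping the trailing remainder) plus a separate cumulative-counter pass for the
-- char-to-word map; objective: simpler decomposition, same cost.

-- ===== PORT A =====
-- state: (current_word_idx, tokens, sentences, current_token, current_sentence, char_to_word_map)
def etmStepA (st : Int × List String × List (List String) × String × List String × PySem.Dict Int Int)
    (p : Int × Char) : Int × List String × List (List String) × String × List String × PySem.Dict Int Int :=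
  match st with
  | (word_idx, tokens, sentences, cur, curS, m) =>
    let m := m.insert p.1 word_idx
    if p.2 = ' ' then (word_idx + 1, tokens ++ [cur], sentences, "", curS ++ [cur], m)
    else if p.2 = '\n' then (word_idx + 1, tokens ++ [cur], sentences ++ [curS ++ [cur]], "", [], m)
    else (word_idx, tokens, sentences, cur.push p.2, curS, m)

def extract_token_mapping (text : String) : List (List String) × List String × (List (Int × Int)) :=
  match (PySem.List.enumerate text.toList 0).foldl etmStepA (0, [], [], "", [], PySem.Dict.empty) with
  | (_, tokens, sentences, _, _, m) => (sentences, tokens, m.items)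

-- ===== PORT B =====
def etmStepB (st : PySem.Dict Int Int × Int) (p : Int × Char) : PySem.Dict Int Int × Int :=
  let m := st.1.insert p.1 st.2
  if p.2 = ' ' ∨ p.2 = '\n' then (m, st.2 + 1) else (m, st.2)

def extract_token_mapping_alt (text : String) : List (List String) × List String × (List (Int × Int)) :=
  let lines := (PySem.Chars.splitOn text.toList ['\n']).map String.ofList
  let sentences := (PySem.List.slice lines none (some (-1))).map
      (fun line => (PySem.Chars.splitOn line.toList [' ']).map String.ofList)
  let tokens := PySem.List.slice
      ((PySem.Chars.splitOn (PySem.Str.replace text "\n" " ").toList [' ']).map String.ofList) none (some (-1))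
  let mw := (PySem.List.enumerate text.toList 0).foldl etmStepB (PySem.Dict.empty, 0)
  (sentences, tokens, mw.1.items)

-- ===== PRECONDITION & SPEC =====
def Spec_extract_token_mapping (text : String) (out : List (List String) × List String × (List (Int × Int))) : Prop := out = extract_token_mapping_alt text
instance (text : String) (out : List (List String) × List String × (List (Int × Int))) : Decidable (Spec_extract_token_mapping text out) := by unfold Spec_extract_token_mapping; infer_instance

-- ===== CLAIM (what is proved, stated in full; the proofs are below) =====
def Claim_equal_extract_token_mapping : Prop := ∀ (text : String), Dom_extract_token_mapping text → Spec_extract_token_mapping text (extract_token_mapping text)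

-- ===== LEMMAS AND PROOFS =====

-- proof-side helpers: a direct recursive characterisation of both programs
def nl2sp (c : Char) : Char := if c = '\n' then ' ' else c

def spl (sep : Char) : List Char → List Char → List (List Char)
  | [], acc => [acc.reverse]
  | c :: cs, acc => if c = sep then acc.reverse :: spl sep cs [] else spl sep cs (c :: acc)

def mapLast (f : List Char → List Char) : List (List Char) → List (List Char)
  | [] => []
  | [x] => [f x]
  | x :: y :: xs => x :: mapLast f (y :: xs)

def tokA : List Char → String → List String
  | [], _ => []
  | c :: cs, cur => if c = ' ' ∨ c = '\n' then cur :: tokA cs "" else tokA cs (cur.push c)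

def sentA : List Char → String → List String → List (List String)
  | [], _, _ => []
  | c :: cs, cur, curS =>
    if c = ' ' then sentA cs "" (curS ++ [cur])
    else if c = '\n' then (curS ++ [cur]) :: sentA cs "" []
    else sentA cs (cur.push c) curS

def mapOf : List Char → Int → Int → List (Int × Int)
  | [], _, _ => []
  | c :: cs, i, w => (i, w) :: mapOf cs (i + 1) (if c = ' ' ∨ c = '\n' then w + 1 else w)

def wEnd : List Char → Int → Int
  | [], w => w
  | c :: cs, w => wEnd cs (if c = ' ' ∨ c = '\n' then w + 1 else w)

def endA : List Char → String → List String → String × List String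
  | [], cur, curS => (cur, curS)
  | c :: cs, cur, curS =>
    if c = ' ' then endA cs "" (curS ++ [cur])
    else if c = '\n' then endA cs "" []
    else endA cs (cur.push c) curS

lemma mk_push (l : List Char) (c : Char) : (String.ofList l).push c = String.ofList (l ++ [c]) := by
  apply String.toList_injective; simp

-- splitOn with a one-char separator computes spl
lemma splitOn_go_spl (sep : Char) (l : List Char) : ∀ (fuel : Nat) (cur : List Char) (acc : List (List Char)),
    l.length ≤ fuel →
    PySem.Chars.splitOn.go [sep] fuel l cur acc = acc.reverse ++ spl sep l cur := by
  induction l with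
  | nil =>
    intro fuel cur acc _
    cases fuel <;> simp [PySem.Chars.splitOn.go, spl]
  | cons c cs ih =>
    intro fuel cur acc h
    cases fuel with
    | zero => simp at h
    | succ f =>
      by_cases hc : c = sep
      · subst hc
        simp [PySem.Chars.splitOn.go, List.isPrefixOf, spl,
          ih f [] (cur.reverse :: acc) (by simpa using h)]
      · simp [PySem.Chars.splitOn.go, List.isPrefixOf, hc, Ne.symm hc, spl,
          ih f (c :: cur) acc (by simpa using h)]

lemma splitOn_eq_spl (sep : Char) (l : List Char) :
    PySem.Chars.splitOn l [sep] = spl sep l [] := by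
  simpa using splitOn_go_spl sep l (l.length + 1) [] [] (by omega)

lemma replace_go_map (l : List Char) : ∀ (fuel : Nat) (acc : List Char),
    l.length ≤ fuel →
    PySem.Chars.replace.go ['\n'] [' '] fuel l acc = acc.reverse ++ l.map nl2sp := by
  induction l with
  | nil => intro fuel acc _; cases fuel <;> simp [PySem.Chars.replace.go]
  | cons c cs ih =>
    intro fuel acc h
    cases fuel with
    | zero => simp at h
    | succ f =>
      by_cases hc : c = '\n'
      · subst hc
        simp [PySem.Chars.replace.go, List.isPrefixOf, nl2sp,
          ih f (' ' :: acc) (by simpa using h)]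
      · simp [PySem.Chars.replace.go, List.isPrefixOf, hc, Ne.symm hc, nl2sp,
          ih f (c :: acc) (by simpa using h)]

lemma replace_eq_map (l : List Char) :
    PySem.Chars.replace l ['\n'] [' '] = l.map nl2sp := by
  simpa using replace_go_map l l.length [] (le_refl _)

lemma spl_ne_nil (sep : Char) (l acc : List Char) : spl sep l acc ≠ [] := by
  induction l generalizing acc with
  | nil => simp [spl]
  | cons c cs ih => by_cases hc : c = sep <;> simp [spl, hc, ih]

lemma spl_append_sep (sep : Char) (l : List Char) : ∀ acc,
    spl sep (l ++ [sep]) acc = spl sep l acc ++ [[]] := by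
  induction l with
  | nil => intro acc; simp [spl]
  | cons c cs ih => intro acc; by_cases hc : c = sep <;> simp [spl, hc, ih]

lemma mapLast_cons_of_ne_nil (f : List Char → List Char) (x : List Char)
    (l : List (List Char)) (h : l ≠ []) : mapLast f (x :: l) = x :: mapLast f l := by
  cases l with
  | nil => exact absurd rfl h
  | cons y ys => simp [mapLast]

lemma spl_append_ne (sep c : Char) (hc : c ≠ sep) (l : List Char) : ∀ acc,
    spl sep (l ++ [c]) acc = mapLast (· ++ [c]) (spl sep l acc) := by
  induction l with
  | nil => intro acc; simp [spl, hc, mapLast]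
  | cons d ds ih =>
    intro acc
    by_cases hd : d = sep
    · subst hd
      have hne := spl_ne_nil d ds ([] : List Char)
      simp only [List.cons_append, spl, if_pos rfl, if_true, eq_self_iff_true]
      rw [mapLast_cons_of_ne_nil _ _ _ hne, ih]
    · simp [spl, hd, ih]

lemma mapLast_append_single (f : List Char → List Char) (xs : List (List Char)) (x : List Char) :
    mapLast f (xs ++ [x]) = xs ++ [f x] := by
  induction xs with
  | nil => simp [mapLast]
  | cons y ys ih =>
    cases ys with
    | nil => simp [mapLast]
    | cons z zs => simpa [mapLast] using ih

-- the token extraction: split-after-newline-replacement, trailing piece dropped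
lemma tok_lemma (cs : List Char) : ∀ (rcur : List Char),
    ((spl ' ' (cs.map nl2sp) rcur).dropLast).map String.ofList = tokA cs (String.ofList rcur.reverse) := by
  induction cs with
  | nil => intro rcur; simp [spl, tokA]
  | cons c cs ih =>
    intro rcur
    by_cases hsp : c = ' ' ∨ c = '\n'
    · have h2 : nl2sp c = ' ' := by rcases hsp with h | h <;> simp [nl2sp, h]
      have hne := spl_ne_nil ' ' (cs.map nl2sp) ([] : List Char)
      rw [List.map_cons, h2]
      simp only [spl, if_pos rfl, if_true, eq_self_iff_true]
      rw [List.dropLast_cons_of_ne_nil hne]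
      simp [tokA, hsp]
      rw [← List.map_dropLast]
      simpa using ih []
    · push_neg at hsp
      have h2 : nl2sp c = c := by simp [nl2sp, hsp.2]
      rw [List.map_cons, h2]
      simp only [spl, if_neg hsp.1]
      simp [tokA, hsp.1, hsp.2, ih (c :: rcur), mk_push]

-- the sentence extraction: split on '\n' (trailing line dropped), each line split on ' '
lemma sent_lemma (cs : List Char) : ∀ (rcur : List Char) (cur : String) (curS : List String),
    spl ' ' rcur.reverse [] = (curS.map String.toList) ++ [cur.toList] →
    ((spl '\n' cs rcur).dropLast).map (fun l => (spl ' ' l []).map String.ofList) = sentA cs cur curS := by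
  induction cs with
  | nil => intro rcur cur curS _; simp [spl, sentA]
  | cons c cs ih =>
    intro rcur cur curS H
    by_cases hnl : c = '\n'
    · subst hnl
      have hne := spl_ne_nil '\n' cs ([] : List Char)
      simp only [spl, if_pos rfl, if_true, eq_self_iff_true]
      rw [List.dropLast_cons_of_ne_nil hne]
      rw [List.map_cons]
      rw [sentA]
      simp only [if_neg (by decide : ¬ ('\n' = ' ')), if_pos rfl, if_true, eq_self_iff_true]
      congr 1
      · rw [H]; simp [Function.comp_def]
      · exact ih [] "" [] (by simp [spl])
    · by_cases hsp : c = ' '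
      · subst hsp
        simp only [spl, if_neg (by decide : ¬ (' ' = '\n'))]
        rw [sentA, if_pos rfl]
        refine ih (' ' :: rcur) "" (curS ++ [cur]) ?_
        have : (' ' :: rcur).reverse = rcur.reverse ++ [' '] := by simp
        rw [this, spl_append_sep, H]
        simp
      · simp only [spl, if_neg hnl]
        rw [sentA, if_neg hsp, if_neg hnl]
        refine ih (c :: rcur) (cur.push c) curS ?_
        have : (c :: rcur).reverse = rcur.reverse ++ [c] := by simp
        rw [this, spl_append_ne ' ' c hsp, H, mapLast_append_single]
        simp [String.toList_push]

-- the cumulative-counter pass of B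
lemma mapB_lemma (cs : List Char) : ∀ (i : Int) (m : PySem.Dict Int Int) (w : Int),
    (∀ k ∈ m.keys, k < i) →
    ((PySem.List.enumerate cs i).foldl etmStepB (m, w)).1.items = m.items ++ mapOf cs i w := by
  induction cs with
  | nil => intro i m w _; simp [PySem.List.enumerate_nil, mapOf]
  | cons c cs ih =>
    intro i m w hm
    have hni : m.contains i = false := by
      by_contra h
      have : m.contains i = true := by simpa using h
      exact absurd (hm i ((PySem.Dict.contains_iff_mem_keys m i).1 this)) (lt_irrefl i)
    have hins : (m.insert i w).items = m.items ++ [(i, w)] :=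
      PySem.Dict.items_insert_of_not_contains m w hni
    have hkeys : ∀ k ∈ (m.insert i w).keys, k < i + 1 := by
      intro k hk
      have hk2 : k ∈ m.keys ++ [i] := by
        have he : (m.insert i w).keys = m.keys ++ [i] := by
          rw [PySem.Dict.keys, PySem.Dict.keys, hins, List.map_append]; rfl
        rwa [he] at hk
      rcases List.mem_append.1 hk2 with h | h
      · exact lt_of_lt_of_le (hm k h) (by omega)
      · simp at h; omega
    rw [PySem.List.enumerate_cons, List.foldl_cons]
    by_cases hsp : c = ' ' ∨ c = '\n'
    · have : etmStepB (m, w) (i, c) = (m.insert i w, w + 1) := by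
        simp [etmStepB, hsp]
      rw [this, ih (i + 1) (m.insert i w) (w + 1) hkeys, hins, mapOf]
      simp [hsp]
    · have : etmStepB (m, w) (i, c) = (m.insert i w, w) := by
        simp only [etmStepB]; rw [if_neg hsp]
      rw [this, ih (i + 1) (m.insert i w) w hkeys, hins, mapOf]
      rw [if_neg hsp]
      simp

-- the one-pass loop of A, fully characterised
lemma mainA (cs : List Char) : ∀ (i w : Int) (toks : List String) (sents : List (List String))
    (cur : String) (curS : List String) (m : PySem.Dict Int Int),
    (∀ k ∈ m.keys, k < i) →
    (PySem.List.enumerate cs i).foldl etmStepA (w, toks, sents, cur, curS, m) =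
      (wEnd cs w, toks ++ tokA cs cur, sents ++ sentA cs cur curS,
       (endA cs cur curS).1, (endA cs cur curS).2,
       PySem.Dict.mk (m.items ++ mapOf cs i w)) := by
  induction cs with
  | nil =>
    intro i w toks sents cur curS m _
    simp [PySem.List.enumerate_nil, wEnd, tokA, sentA, endA, mapOf]
  | cons c cs ih =>
    intro i w toks sents cur curS m hm
    have hni : m.contains i = false := by
      by_contra h
      have : m.contains i = true := by simpa using h
      exact absurd (hm i ((PySem.Dict.contains_iff_mem_keys m i).1 this)) (lt_irrefl i)
    have hins : (m.insert i w).items = m.items ++ [(i, w)] :=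
      PySem.Dict.items_insert_of_not_contains m w hni
    have hkeys : ∀ k ∈ (m.insert i w).keys, k < i + 1 := by
      intro k hk
      have hk2 : k ∈ m.keys ++ [i] := by
        have he : (m.insert i w).keys = m.keys ++ [i] := by
          rw [PySem.Dict.keys, PySem.Dict.keys, hins, List.map_append]; rfl
        rwa [he] at hk
      rcases List.mem_append.1 hk2 with h | h
      · exact lt_of_lt_of_le (hm k h) (by omega)
      · simp at h; omega
    rw [PySem.List.enumerate_cons, List.foldl_cons]
    by_cases hsp : c = ' '
    · subst hsp
      have : etmStepA (w, toks, sents, cur, curS, m) (i, ' ') =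
          (w + 1, toks ++ [cur], sents, "", curS ++ [cur], m.insert i w) := by
        simp [etmStepA]
      rw [this, ih (i + 1) (w + 1) (toks ++ [cur]) sents "" (curS ++ [cur]) (m.insert i w) hkeys,
        hins]
      simp [wEnd, tokA, sentA, endA, mapOf]
    · by_cases hnl : c = '\n'
      · subst hnl
        have : etmStepA (w, toks, sents, cur, curS, m) (i, '\n') =
            (w + 1, toks ++ [cur], sents ++ [curS ++ [cur]], "", [], m.insert i w) := by
          simp [etmStepA]
        rw [this, ih (i + 1) (w + 1) (toks ++ [cur]) (sents ++ [curS ++ [cur]]) "" [] (m.insert i w) hkeys,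
          hins]
        simp [wEnd, tokA, sentA, endA, mapOf]
      · have : etmStepA (w, toks, sents, cur, curS, m) (i, c) =
            (w, toks, sents, cur.push c, curS, m.insert i w) := by
          simp [etmStepA, hsp, hnl]
        rw [this, ih (i + 1) w toks sents (cur.push c) curS (m.insert i w) hkeys, hins]
        simp [wEnd, tokA, sentA, endA, mapOf, hsp, hnl]

lemma slice_neg_one {α : Type} (l : List α) :
    PySem.List.slice l none (some (-1)) = l.dropLast := by
  cases l with
  | nil => rfl
  | cons x xs =>
    have h1 : PySem.List.clampIdx (x :: xs).length (-1) = xs.length := by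
      simp [PySem.List.clampIdx]
    simp only [PySem.List.slice, h1]
    rw [List.dropLast_eq_take]
    simp

-- ===== VERDICT (by name: the statement is the Claim_ definition above) =====
theorem extract_token_mapping_spec : Claim_equal_extract_token_mapping := by
  intro text _
  unfold Spec_extract_token_mapping extract_token_mapping extract_token_mapping_alt
  rw [mainA text.toList 0 0 [] [] "" [] PySem.Dict.empty (by simp [PySem.Dict.keys, PySem.Dict.empty])]
  have hmapB := mapB_lemma text.toList 0 PySem.Dict.empty 0 (by simp [PySem.Dict.keys, PySem.Dict.empty])
  have hlines : PySem.Chars.splitOn text.toList ['\n'] = spl '\n' text.toList [] := splitOn_eq_spl _ _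
  have hrep : (PySem.Str.replace text "\n" " ").toList = text.toList.map nl2sp := by
    rw [PySem.Str.toList_replace]; exact replace_eq_map _
  have htok : ((spl ' ' (text.toList.map nl2sp) []).dropLast).map String.ofList = tokA text.toList "" := by
    simpa using tok_lemma text.toList []
  have hsent := sent_lemma text.toList [] "" [] (by simp [spl])
  simp only [hlines, hrep, splitOn_eq_spl, slice_neg_one, hmapB]
  refine Prod.ext ?_ (Prod.ext ?_ ?_)
  · -- sentences
    show sentA text.toList "" [] = _
    rw [← hsent]
    rw [← List.map_dropLast]
    rw [List.map_map]
    congr 1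
    funext l
    simp [splitOn_eq_spl]
  · -- tokens
    show tokA text.toList "" = _
    rw [← htok, List.map_dropLast]
  · -- map
    simp [PySem.Dict.empty]
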